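-- pv_equiv track=rewrite | github.com/RitzKid76/C3-Trees-ACSL | main.py | string_pairs
-- ===== SOURCE A (Python) =====
-- def maxv(output, i):
--     left = -1
--     right = output[i][1]
--
--     if(i > 0):
--         left = output[i - 1][1]
--     return max(left, right)
--
-- def string_pairs(input):
--     input = [c for c in input]
--     output = [(input.pop(0), 0)]
--     while len(input) > 0:
--         c = input.pop(0)
--
--         #stupid fix cause python enumerate is a while loop
--         didntinsert = False
--
--         for i, (char, value) in enumerate(output):
--             if(c > char):
--                 max = maxv(output, i) + 1
--                 output.insert(i, (c, max))
--                 break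
--
--             if(i == len(output) - 1):
--                 didntinsert = True
--
--         #continued fix pain
--         if(didntinsert):
--             max = output[len(output) - 1][1] + 1
--             output.append((c, max))
--
--     output.reverse()
--     return output
-- ===== SOURCE B (Python) =====
-- def string_pairs(input):
--     chars = list(input)
--     asc = [(chars[0], 0)]  # ascending by char; A builds descending then reverses
--     for c in chars[1:]:
--         lo, hi = 0, len(asc)
--         while lo < hi:  # hand-written bisect_left on the char keys
--             mid = (lo + hi) // 2
--             if asc[mid][0] < c:
--                 lo = mid + 1
--             else:
--                 hi = mid
--         left = asc[lo - 1][1] if lo > 0 else -1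
--         right = asc[lo][1] if lo < len(asc) else -1
--         asc.insert(lo, (c, max(left, right) + 1))
--     return asc
-- ===== Notes on version B (the rewrite author's own statement) =====
-- stated objective: faster
-- what changed: B builds the ascending result list directly (no final reverse) and finds each insertion point with a hand-written binary search over the sorted keys plus O(1) neighbor lookups, instead of A's linear enumerate scan with the maxv helper over a descending list.
import Mathlib
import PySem

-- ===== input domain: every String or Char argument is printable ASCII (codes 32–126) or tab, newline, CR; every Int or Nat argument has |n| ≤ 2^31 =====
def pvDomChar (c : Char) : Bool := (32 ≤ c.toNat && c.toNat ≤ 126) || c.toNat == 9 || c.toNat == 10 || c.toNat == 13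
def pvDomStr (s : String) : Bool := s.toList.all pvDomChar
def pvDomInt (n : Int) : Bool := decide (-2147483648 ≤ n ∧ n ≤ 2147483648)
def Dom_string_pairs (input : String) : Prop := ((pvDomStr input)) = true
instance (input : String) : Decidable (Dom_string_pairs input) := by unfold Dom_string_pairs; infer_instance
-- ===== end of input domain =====

-- B replaces A's linear enumerate scan over a descending list (reversed at the end) by building the
-- ascending list directly with a hand-written binary search for each insertion point (objective:
-- faster, measured; the per-element scan cost drops from O(n) to O(log n)).

-- ===== PORT A =====
-- maxv(output, i): left = -1; right = output[i][1]; if i > 0: left = output[i-1][1]; return max(left, right)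
-- (both indices are in range at every call site, so getD is exact)
def pvMaxv (output : List (Char × Int)) (i : Nat) : Int :=
  let right := (output.getD i (' ', 0)).2
  let left := if i > 0 then (output.getD (i - 1) (' ', 0)).2 else -1
  max left right

-- the inner `for i, (char, value) in enumerate(output)` with break, plus the trailing
-- `didntinsert` append (which fires exactly when the for loop never breaks)
def pvScanA (c : Char) (rest : List (Char × Int)) (i : Nat) (output : List (Char × Int)) :
    List (Char × Int) :=
  match rest with
  | [] => output ++ [(c, (output.getLastD (' ', 0)).2 + 1)]  -- output[len(output)-1][1] + 1 (output nonempty here)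
  | (ch, _) :: tl =>
    if ch < c then PySem.List.insert output (i : Int) (c, pvMaxv output i + 1)
    else pvScanA c tl (i + 1) output

-- the outer `while len(input) > 0` loop
def pvWhileA (inp : List Char) (output : List (Char × Int)) : List (Char × Int) :=
  match inp with
  | [] => output
  | c :: rest => pvWhileA rest (pvScanA c output 0 output)

def string_pairs (input : String) : List (String × Int) :=
  match input.toList with
  | [] => []  -- Python raises IndexError on "" (input.pop(0)); excluded by Pre_
  | c :: rest =>
    ((pvWhileA rest [(c, 0)]).reverse).map (fun p => (String.mk [p.1], p.2))

-- ===== PORT B =====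
-- hand-written bisect_left of Source B: while lo < hi: mid = (lo+hi)//2; …
def pvBisect (asc : List (Char × Int)) (c : Char) (lo hi : Nat) : Nat :=
  if _h : lo < hi then
    let mid := (lo + hi) / 2
    if (asc.getD mid (' ', 0)).1 < c then pvBisect asc c (mid + 1) hi
    else pvBisect asc c lo mid
  else lo
termination_by hi - lo
decreasing_by all_goals omega

-- the `for c in chars[1:]` loop of Source B
def pvLoopB (cs : List Char) (asc : List (Char × Int)) : List (Char × Int) :=
  match cs with
  | [] => asc
  | c :: rest =>
    let lo := pvBisect asc c 0 asc.length
    let left := if lo > 0 then (asc.getD (lo - 1) (' ', 0)).2 else -1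
    let right := if lo < asc.length then (asc.getD lo (' ', 0)).2 else -1
    pvLoopB rest (PySem.List.insert asc (lo : Int) (c, max left right + 1))

def string_pairs_alt (input : String) : List (String × Int) :=
  match input.toList with
  | [] => []  -- Source B raises IndexError on "" (chars[0]); excluded by Pre_
  | c :: rest => (pvLoopB rest [(c, 0)]).map (fun p => (String.mk [p.1], p.2))

-- ===== PRECONDITION & SPEC =====
-- Pre_ excludes exactly the empty string, on which A raises IndexError (input.pop(0) from []).
def Pre_string_pairs (input : String) : Prop := input ≠ ""
instance (input : String) : Decidable (Pre_string_pairs input) := by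
  unfold Pre_string_pairs; infer_instance
def pvWitness_string_pairs : String := "ab"

def Spec_string_pairs (input : String) (out : List (String × Int)) : Prop := out = string_pairs_alt input
instance (input : String) (out : List (String × Int)) : Decidable (Spec_string_pairs input out) := by unfold Spec_string_pairs; infer_instance

-- ===== CLAIM (what is proved, stated in full; the proofs are below) =====
def Claim_equal_string_pairs : Prop := ∀ (input : String), Dom_string_pairs input → Pre_string_pairs input → Spec_string_pairs input (string_pairs input)

-- ===== LEMMAS AND PROOFS =====

-- proof-only abbreviations
lemma pvGetElem_idx {α : Type} (l : List α) {i j : Nat} (h : i = j) (hi : i < l.length)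
    (hj : j < l.length) : l[i] = l[j] := by subst h; rfl

def pvSat (c : Char) (p : Char × Int) : Bool := decide (p.1 < c)
def pvCnt (c : Char) (l : List (Char × Int)) : Nat := l.countP (pvSat c)
def pvAsc (l : List (Char × Int)) : Prop := List.Pairwise (fun p q : Char × Int => p.1 ≤ q.1) l
def pvNonneg (l : List (Char × Int)) : Prop := ∀ p ∈ l, (0 : Int) ≤ p.2

-- one step of pvLoopB (definitionally its body)
def pvStepB (c : Char) (asc : List (Char × Int)) : List (Char × Int) :=
  let lo := pvBisect asc c 0 asc.length
  let left := if lo > 0 then (asc.getD (lo - 1) (' ', 0)).2 else -1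
  let right := if lo < asc.length then (asc.getD lo (' ', 0)).2 else -1
  PySem.List.insert asc (lo : Int) (c, max left right + 1)

lemma pvLoopB_cons (c : Char) (cs : List Char) (asc : List (Char × Int)) :
    pvLoopB (c :: cs) asc = pvLoopB cs (pvStepB c asc) := rfl

-- L1: in an ascending list, the first pvCnt elements are exactly the ones below c
lemma pvTakeDrop_sat (c : Char) (asc : List (Char × Int)) (h : pvAsc asc) :
    (∀ p ∈ asc.take (pvCnt c asc), pvSat c p = true) ∧
      (∀ p ∈ asc.drop (pvCnt c asc), pvSat c p = false) := by
  induction asc with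
  | nil => simp
  | cons hd tl ih =>
    rcases List.pairwise_cons.mp h with ⟨hhd, htl⟩
    by_cases hs : pvSat c hd = true
    · have hcnt : pvCnt c (hd :: tl) = pvCnt c tl + 1 := by
        simp [pvCnt, hs]
      rcases ih htl with ⟨h1, h2⟩
      refine ⟨?_, ?_⟩
      · rw [hcnt]
        intro p hp
        rcases List.mem_cons.mp (by simpa using hp) with rfl | hp'
        · exact hs
        · exact h1 p hp'
      · rw [hcnt]
        intro p hp
        exact h2 p (by simpa using hp)
    · have hall : ∀ q ∈ hd :: tl, pvSat c q = false := by
        intro q hq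
        rcases List.mem_cons.mp hq with rfl | hq'
        · simpa using hs
        · have hle : hd.1 ≤ q.1 := hhd q hq'
          have : ¬ hd.1 < c := by simpa [pvSat] using hs
          simp only [pvSat, decide_eq_false_iff_not]
          intro hlt
          exact this (lt_of_le_of_lt hle hlt)
      have hcnt : pvCnt c (hd :: tl) = 0 := by
        simp only [pvCnt, List.countP_eq_zero]
        intro a ha
        simp [hall a ha]
      rw [hcnt]
      exact ⟨by simp, fun p hp => hall p (by simpa using hp)⟩

-- L2: the binary search returns the count of elements below c
lemma pvBisect_eq (c : Char) (asc : List (Char × Int)) (hA : pvAsc asc) :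
    ∀ lo hi, lo ≤ hi → hi ≤ asc.length →
      (∀ j (hj : j < asc.length), j < lo → pvSat c asc[j] = true) →
      (∀ j (hj : j < asc.length), hi ≤ j → pvSat c asc[j] = false) →
      pvBisect asc c lo hi = pvCnt c asc := by
  have hidx := List.pairwise_iff_getElem.mp hA
  have base : ∀ lo, lo ≤ asc.length →
      (∀ j (hj : j < asc.length), j < lo → pvSat c asc[j] = true) →
      (∀ j (hj : j < asc.length), lo ≤ j → pvSat c asc[j] = false) →
      lo = pvCnt c asc := by
    intro lo hlen hlow hhigh
    have hsplit : pvCnt c asc =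
        (asc.take lo).countP (pvSat c) + (asc.drop lo).countP (pvSat c) := by
      rw [pvCnt, ← List.countP_append, List.take_append_drop]
    have h1 : (asc.take lo).countP (pvSat c) = lo := by
      have : (asc.take lo).countP (pvSat c) = (asc.take lo).length :=
        List.countP_eq_length.mpr (by
          intro a ha
          rw [List.mem_iff_getElem] at ha
          rcases ha with ⟨i, hi, rfl⟩
          rw [List.getElem_take]
          exact hlow i (by simp at hi; omega) (by simp at hi; omega))
      rw [this, List.length_take]; omega
    have h2 : (asc.drop lo).countP (pvSat c) = 0 := by
      rw [List.countP_eq_zero]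
      intro a ha
      rw [List.mem_iff_getElem] at ha
      rcases ha with ⟨i, hi, rfl⟩
      rw [List.getElem_drop]
      simp [hhigh (lo + i) (by simp at hi; omega) (by omega)]
    omega
  have main : ∀ n lo hi, hi - lo ≤ n → lo ≤ hi → hi ≤ asc.length →
      (∀ j (hj : j < asc.length), j < lo → pvSat c asc[j] = true) →
      (∀ j (hj : j < asc.length), hi ≤ j → pvSat c asc[j] = false) →
      pvBisect asc c lo hi = pvCnt c asc := by
    intro n
    induction n with
    | zero =>
      intro lo hi hfuel hlh hlen hlow hhigh
      have hlh' : ¬ lo < hi := by omega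
      rw [pvBisect, dif_neg hlh']
      exact base lo (by omega) hlow (by
        intro j hj hjlo
        exact hhigh j hj (by omega))
    | succ n ih =>
      intro lo hi hfuel hlh hlen hlow hhigh
      by_cases h : lo < hi
      · rw [pvBisect, dif_pos h]
        set mid := (lo + hi) / 2 with hmid
        have hmlt : mid < hi := by omega
        have hmle : lo ≤ mid := by omega
        have hmlen : mid < asc.length := by omega
        simp only [List.getD_eq_getElem asc (' ', 0) hmlen]
        by_cases hs : asc[mid].1 < c
        · rw [if_pos hs]
          refine ih (mid + 1) hi (by omega) (by omega) hlen ?_ hhigh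
          intro j hj hjlt
          have hjsat : asc[j].1 < c := by
            rcases Nat.lt_or_ge j mid with hjm | hjm
            · exact lt_of_le_of_lt (hidx j mid hj hmlen hjm) hs
            · have : j = mid := by omega
              subst this; exact hs
          simp [pvSat, hjsat]
        · rw [if_neg hs]
          refine ih lo mid (by omega) (by omega) (by omega) hlow ?_
          intro j hj hjge
          have : ¬ asc[j].1 < c := by
            rcases Nat.lt_or_ge mid j with hjm | hjm
            · intro hlt
              exact hs (lt_of_le_of_lt (hidx mid j hmlen hj hjm) hlt)
            · have : j = mid := by omega
              subst this; exact hs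
          simp [pvSat, this]
      · rw [pvBisect, dif_neg h]
        exact base lo (by omega) hlow (by
          intro j hj hjlo
          exact hhigh j hj (by omega))
  intro lo hi h1 h2 h3 h4
  exact main (hi - lo) lo hi le_rfl h1 h2 h3 h4

-- L5: in the non-increasing list, findIdx of (< c) is length - count
lemma pvFindIdx_eq (c : Char) (out : List (Char × Int))
    (h : List.Pairwise (fun p q : Char × Int => q.1 ≤ p.1) out) :
    out.findIdx (pvSat c) = out.length - out.countP (pvSat c) := by
  induction out with
  | nil => simp
  | cons hd tl ih =>
    rcases List.pairwise_cons.mp h with ⟨hhd, htl⟩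
    by_cases hs : pvSat c hd = true
    · have hall : (hd :: tl).countP (pvSat c) = (hd :: tl).length := by
        rw [List.countP_eq_length]
        intro q hq
        rcases List.mem_cons.mp hq with rfl | hq'
        · exact hs
        · have hle : q.1 ≤ hd.1 := hhd q hq'
          have hlt : hd.1 < c := by simpa [pvSat] using hs
          simp [pvSat, lt_of_le_of_lt hle hlt]
      rw [List.findIdx_cons, hs, hall]
      simp
    · have hcle := List.countP_le_length (p := pvSat c) (l := tl)
      have hf : pvSat c hd = false := by simpa using hs
      rw [List.findIdx_cons, hf]
      simp only [cond_false, List.countP_cons, hf, Bool.false_eq_true, if_false, List.length_cons, Nat.add_zero]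
      rw [ih htl]
      omega

-- L3: characterization of the inner scan of A
lemma pvScanA_spec (c : Char) : ∀ (s : List (Char × Int)) (k : Nat) (out : List (Char × Int)),
    out.drop k = s →
    pvScanA c s k out =
      if s.all (fun p => !pvSat c p)
      then out ++ [(c, (out.getLastD (' ', 0)).2 + 1)]
      else out.take (k + s.findIdx (pvSat c)) ++
        (c, pvMaxv out (k + s.findIdx (pvSat c)) + 1) :: out.drop (k + s.findIdx (pvSat c)) := by
  intro s
  induction s with
  | nil => intro k out _; simp [pvScanA]
  | cons hd tl ih =>
    intro k out hdrop
    obtain ⟨ch, v⟩ := hd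
    have hk : k < out.length := by
      by_contra hk
      rw [List.drop_eq_nil_of_le (by omega)] at hdrop
      simp at hdrop
    by_cases hs : ch < c
    · have hsat : pvSat c (ch, v) = true := by simp [pvSat, hs]
      rw [pvScanA, if_pos hs]
      rw [List.all_cons, hsat]
      simp only [Bool.not_true, Bool.false_and, List.findIdx_cons, hsat, cond_true,
        Nat.add_zero]
      exact PySem.List.insert_natCast out k _ (by omega)
    · have hsat : pvSat c (ch, v) = false := by simp [pvSat, hs]
      have hdrop' : out.drop (k + 1) = tl := by
        have h1 : out.drop (k + 1) = (out.drop k).drop 1 := by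
          rw [List.drop_drop, Nat.add_comm]
        rw [h1, hdrop]
        rfl
      rw [pvScanA, if_neg hs, ih (k + 1) out hdrop']
      rw [List.all_cons, hsat]
      simp only [Bool.not_false, Bool.true_and, List.findIdx_cons, hsat, cond_false]
      have harith : k + 1 + tl.findIdx (pvSat c) = k + (tl.findIdx (pvSat c) + 1) := by omega
      rw [harith]

-- binary search over the whole list
lemma pvBisect_full (c : Char) (asc : List (Char × Int)) (hA : pvAsc asc) :
    pvBisect asc c 0 asc.length = pvCnt c asc := by
  refine pvBisect_eq c asc hA 0 asc.length (Nat.zero_le _) le_rfl ?_ ?_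
  · intro j hj hj0; exact absurd hj0 (by omega)
  · intro j hj hjge; exact absurd hjge (by omega)

-- the result of one B step, as take ++ new ++ drop
lemma pvStepB_shape (c : Char) (asc : List (Char × Int)) (hA : pvAsc asc) :
    pvStepB c asc = asc.take (pvCnt c asc) ++
      (c, max (if 0 < pvCnt c asc then (asc.getD (pvCnt c asc - 1) (' ', 0)).2 else -1)
          (if pvCnt c asc < asc.length then (asc.getD (pvCnt c asc) (' ', 0)).2 else -1) + 1)
      :: asc.drop (pvCnt c asc) := by
  simp only [pvStepB, pvBisect_full c asc hA, gt_iff_lt]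
  exact PySem.List.insert_natCast asc _ _ List.countP_le_length

-- L4: one step of A, reversed, is one step of B
lemma pvStep_eq (c : Char) (asc : List (Char × Int)) (hA : pvAsc asc) (hN : pvNonneg asc)
    (hne : asc ≠ []) :
    (pvScanA c asc.reverse 0 asc.reverse).reverse = pvStepB c asc := by
  have hcnt_le : pvCnt c asc ≤ asc.length := List.countP_le_length
  have hbis : pvBisect asc c 0 asc.length = pvCnt c asc := pvBisect_full c asc hA
  have hcrev : asc.reverse.countP (pvSat c) = pvCnt c asc := List.countP_reverse
  have hscan := pvScanA_spec c asc.reverse 0 asc.reverse List.drop_zero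
  simp only [Nat.zero_add] at hscan
  by_cases hc : pvCnt c asc = 0
  · have hall : asc.reverse.all (fun p => !pvSat c p) = true := by
      rw [List.all_eq_true]
      intro p hp
      have := List.countP_eq_zero.mp (hcrev.trans hc) p hp
      simp [this]
    rw [hscan, if_pos hall]
    obtain ⟨a0, t, rfl⟩ : ∃ a0 t, asc = a0 :: t := by
      cases asc with
      | nil => exact absurd rfl hne
      | cons a t => exact ⟨a, t, rfl⟩
    have ha0 : (0 : Int) ≤ a0.2 := hN a0 (List.mem_cons_self)
    have hlast : ((a0 :: t).reverse.getLastD (' ', 0)) = a0 := by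
      rw [List.getLastD_eq_getLast?, List.getLast?_reverse]
      rfl
    rw [hlast, List.reverse_append, List.reverse_reverse]
    simp only [pvStepB, hbis, hc]
    rw [show ((0 : Nat) : Int) = (0 : Int) from rfl, PySem.List.insert_zero]
    simp only [List.reverse_cons, List.reverse_nil, List.nil_append, List.singleton_append,
      gt_iff_lt, Nat.lt_irrefl, if_false, List.length_cons, Nat.succ_pos, if_pos,
      List.getD_cons_zero]
    rw [max_eq_right (by omega : (-1 : Int) ≤ a0.2)]
  · have hpos : 0 < pvCnt c asc := Nat.pos_of_ne_zero hc
    have hlen_pos : 0 < asc.length := by omega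
    have hall : asc.reverse.all (fun p => !pvSat c p) = false := by
      rcases List.countP_pos_iff.mp (by rw [hcrev]; omega) with ⟨a, ha, hsa⟩
      rw [List.all_eq_false]
      exact ⟨a, ha, by simp [hsa]⟩
    have hpw_out : List.Pairwise (fun p q : Char × Int => q.1 ≤ p.1) asc.reverse := by
      rw [List.pairwise_reverse]; exact hA
    have hfind : asc.reverse.findIdx (pvSat c) = asc.length - pvCnt c asc := by
      rw [pvFindIdx_eq c _ hpw_out, List.length_reverse, hcrev]
    rw [hscan, if_neg (by rw [hall]; exact Bool.false_ne_true), hfind]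
    have hvals : pvMaxv asc.reverse (asc.length - pvCnt c asc) =
        max (if 0 < pvCnt c asc then (asc.getD (pvCnt c asc - 1) (' ', 0)).2 else -1)
          (if pvCnt c asc < asc.length then (asc.getD (pvCnt c asc) (' ', 0)).2 else -1) := by
      simp only [pvMaxv]
      have hi_lt : asc.length - pvCnt c asc < asc.reverse.length := by
        rw [List.length_reverse]; omega
      rw [List.getD_eq_getElem _ _ hi_lt, List.getElem_reverse]
      rw [pvGetElem_idx asc
        (show asc.length - 1 - (asc.length - pvCnt c asc) = pvCnt c asc - 1 by omega)
        (by omega) (by omega)]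
      rw [if_pos hpos, List.getD_eq_getElem asc (' ', 0) (by omega : pvCnt c asc - 1 < asc.length)]
      by_cases hcn : pvCnt c asc < asc.length
      · have hi_pos : 0 < asc.length - pvCnt c asc := by omega
        rw [if_pos hi_pos, if_pos hcn]
        have him : asc.length - pvCnt c asc - 1 < asc.reverse.length := by
          rw [List.length_reverse]; omega
        rw [List.getD_eq_getElem _ _ him, List.getElem_reverse]
        rw [pvGetElem_idx asc
          (show asc.length - 1 - (asc.length - pvCnt c asc - 1) = pvCnt c asc by omega)
          (by omega) (by omega)]
        rw [List.getD_eq_getElem asc (' ', 0) (by omega : pvCnt c asc < asc.length)]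
        exact max_comm _ _
      · have hcn' : pvCnt c asc = asc.length := by omega
        rw [if_neg (by omega : ¬ 0 < asc.length - pvCnt c asc), if_neg hcn]
        exact max_comm _ _
    simp only [pvStepB, hbis, gt_iff_lt]
    rw [PySem.List.insert_natCast asc (pvCnt c asc) _ hcnt_le]
    have hsplit : ∀ (X Z : List (Char × Int)) y, (X ++ y :: Z).reverse = Z.reverse ++ y :: X.reverse := by
      intro X Z y
      simp
    rw [hsplit]
    have h1 : ((asc.reverse.drop (asc.length - pvCnt c asc))).reverse = asc.take (pvCnt c asc) := by
      rw [List.reverse_drop, List.reverse_reverse, List.length_reverse]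
      congr 1
      omega
    have h2 : ((asc.reverse.take (asc.length - pvCnt c asc))).reverse = asc.drop (pvCnt c asc) := by
      rw [List.reverse_take, List.reverse_reverse, List.length_reverse]
      congr 1
      omega
    rw [h1, h2, hvals, if_pos hpos]

lemma pvStepB_asc (c : Char) (asc : List (Char × Int)) (hA : pvAsc asc) :
    pvAsc (pvStepB c asc) := by
  rw [pvStepB_shape c asc hA]
  obtain ⟨hsat, hunsat⟩ := pvTakeDrop_sat c asc hA
  rw [pvAsc, List.pairwise_append]
  refine ⟨hA.sublist (List.take_sublist _ _), ?_, ?_⟩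
  · rw [List.pairwise_cons]
    refine ⟨?_, hA.sublist (List.drop_sublist _ _)⟩
    intro q hq
    have : ¬ q.1 < c := by simpa [pvSat] using hunsat q hq
    exact le_of_not_gt this
  · intro a ha b hb
    have halt : a.1 < c := by simpa [pvSat] using hsat a ha
    rcases List.mem_cons.mp hb with rfl | hb'
    · exact le_of_lt halt
    · have : ¬ b.1 < c := by simpa [pvSat] using hunsat b hb'
      exact le_of_lt (lt_of_lt_of_le halt (le_of_not_gt this))

lemma pvStepB_nonneg (c : Char) (asc : List (Char × Int)) (hA : pvAsc asc) (hN : pvNonneg asc) :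
    pvNonneg (pvStepB c asc) := by
  rw [pvStepB_shape c asc hA]
  intro p hp
  have hleft : (-1 : Int) ≤
      (if 0 < pvCnt c asc then (asc.getD (pvCnt c asc - 1) (' ', 0)).2 else -1) := by
    split_ifs with h
    · have hlt : pvCnt c asc - 1 < asc.length := by
        have hle : pvCnt c asc ≤ asc.length := List.countP_le_length (p := pvSat c) (l := asc)
        omega
      rw [List.getD_eq_getElem _ _ hlt]
      have := hN _ (List.getElem_mem hlt)
      omega
    · exact le_refl _
  have hright : (-1 : Int) ≤
      (if pvCnt c asc < asc.length then (asc.getD (pvCnt c asc) (' ', 0)).2 else -1) := by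
    split_ifs with h
    · rw [List.getD_eq_getElem _ _ h]
      have := hN _ (List.getElem_mem h)
      omega
    · exact le_refl _
  rcases List.mem_append.mp hp with h1 | h1
  · exact hN p (List.mem_of_mem_take h1)
  · rcases List.mem_cons.mp h1 with rfl | h2
    · simp only []
      omega
    · exact hN p (List.mem_of_mem_drop h2)

lemma pvStepB_ne_nil (c : Char) (asc : List (Char × Int)) (hA : pvAsc asc) :
    pvStepB c asc ≠ [] := by
  rw [pvStepB_shape c asc hA]
  simp

-- L9: the two loops agree
lemma pvLoops_eq (cs : List Char) : ∀ (asc : List (Char × Int)), pvAsc asc → pvNonneg asc →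
    asc ≠ [] → pvWhileA cs asc.reverse = (pvLoopB cs asc).reverse := by
  induction cs with
  | nil => intro asc _ _ _; rfl
  | cons c rest ih =>
    intro asc hA hN hne
    have hstep : pvScanA c asc.reverse 0 asc.reverse = (pvStepB c asc).reverse := by
      rw [← pvStep_eq c asc hA hN hne, List.reverse_reverse]
    show pvWhileA rest (pvScanA c asc.reverse 0 asc.reverse) = (pvLoopB (c :: rest) asc).reverse
    rw [hstep, pvLoopB_cons,
      ih (pvStepB c asc) (pvStepB_asc c asc hA) (pvStepB_nonneg c asc hA hN)
        (pvStepB_ne_nil c asc hA)]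

-- ===== VERDICT (by name: the statement is the Claim_ definition above) =====
theorem string_pairs_spec : Claim_equal_string_pairs := by
  intro input _hDom hPre
  unfold Spec_string_pairs string_pairs string_pairs_alt
  rcases h : input.toList with _ | ⟨c, rest⟩
  · rfl
  · show ((pvWhileA rest [(c, 0)]).reverse).map _ = (pvLoopB rest [(c, 0)]).map _
    have := pvLoops_eq rest [(c, 0)] (by simp [pvAsc]) (by simp [pvNonneg]) (by simp)
    simp only [show ([((c : Char), (0 : Int))] : List (Char × Int)).reverse = [(c, 0)] from rfl] at this
    rw [this, List.reverse_reverse]
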